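-- pv_equiv track=rewrite | github.com/DhruvalBhinsara1/SIH-webscraper | scrapers/government_schemes_scraper.py | _filter_scheme_links
-- ===== SOURCE A (Python) =====
-- from typing import List, Dict, Any
--
-- def _filter_scheme_links(links: List[str]) -> List[str]:
--     """Filter links that are likely to contain scheme information"""
--     scheme_keywords = [
--         'scheme', 'yojana', 'program', 'subsidy', 'grant', 'policy',
--         'rainwater', 'harvesting', 'water', 'irrigation', 'watershed',
--         'pmksy', 'jal', 'shakti', 'amrut', 'mission'
--     ]
--
--     filtered_links = []
--     for link in links:
--         link_lower = link.lower()
--         if any(keyword in link_lower for keyword in scheme_keywords):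
--             filtered_links.append(link)
--
--     return filtered_links
-- ===== SOURCE B (Python) =====
-- from typing import List, Dict, Any
--
-- _SCHEME_KEYWORDS = (
--     'scheme', 'yojana', 'program', 'subsidy', 'grant', 'policy',
--     'rainwater', 'harvesting', 'water', 'irrigation', 'watershed',
--     'pmksy', 'jal', 'shakti', 'amrut', 'mission'
-- )
--
-- def _filter_scheme_links(links: List[str]) -> List[str]:
--     """Filter links likely to contain scheme information: position-major scan.
--
--     Instead of testing each keyword for substring membership, walk the
--     lowered link once and at each position test whether some keyword
--     starts there (a naive multi-pattern matcher / regex-alternation scan).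
--     """
--     out = []
--     for link in links:
--         low = link.lower()
--         if any(low.startswith(k, i) for i in range(len(low)) for k in _SCHEME_KEYWORDS):
--             out.append(link)
--     return out
-- ===== Notes on version B (the rewrite author's own statement) =====
-- stated objective: alternative
-- what changed: B replaces A's keyword-major inner loop of substring-membership tests ('k in low') by a position-major scan of the lowered link that tests at each index whether some keyword starts there (naive multi-pattern / regex-alternation matching), keeping order and the .lower() call.
import Mathlib
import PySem

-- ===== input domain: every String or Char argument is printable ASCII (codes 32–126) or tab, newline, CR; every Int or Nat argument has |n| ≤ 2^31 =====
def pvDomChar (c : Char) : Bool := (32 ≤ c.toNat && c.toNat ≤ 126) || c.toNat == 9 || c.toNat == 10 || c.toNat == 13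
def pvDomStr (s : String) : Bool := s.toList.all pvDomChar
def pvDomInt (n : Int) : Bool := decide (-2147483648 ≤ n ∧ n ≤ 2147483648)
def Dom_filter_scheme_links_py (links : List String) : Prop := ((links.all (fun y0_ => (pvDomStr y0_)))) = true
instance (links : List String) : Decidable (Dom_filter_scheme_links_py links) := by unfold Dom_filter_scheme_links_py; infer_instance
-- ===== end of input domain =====

-- B replaces A's keyword-major substring-membership loop with a position-major
-- prefix scan of the lowered link (naive multi-pattern matching); same outputs, same order.

-- the scheme keyword list shared by both programs (same literals, same order)
def pvSchemeKeywords : List String :=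
  ["scheme", "yojana", "program", "subsidy", "grant", "policy",
   "rainwater", "harvesting", "water", "irrigation", "watershed",
   "pmksy", "jal", "shakti", "amrut", "mission"]

-- ===== PORT A =====
-- for link in links: if any(keyword in link.lower() for keyword in scheme_keywords): append
def filter_scheme_links_py (links : List String) : List String :=
  links.foldl (fun filtered link =>
    let link_lower := PySem.Str.lower link
    if pvSchemeKeywords.any (fun keyword => PySem.Str.isIn keyword link_lower)
    then filtered ++ [link] else filtered) []

-- ===== PORT B =====
-- for link in links: if any(low.startswith(k, i) for i in range(len(low)) for k in KEYWORDS): append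
-- low.startswith(k, i) with 0 ≤ i is exactly a prefix test on low.toList.drop i (exact on this range)
def filter_scheme_links_py_alt (links : List String) : List String :=
  links.foldl (fun out link =>
    let low := PySem.Str.lower link
    if (PySem.List.pyRange 0 (PySem.Str.len low) 1).any (fun i =>
         pvSchemeKeywords.any (fun k =>
           PySem.Chars.startswith (low.toList.drop i.toNat) k.toList))
    then out ++ [link] else out) []

-- ===== PRECONDITION & SPEC =====
def Spec_filter_scheme_links_py (links : List String) (out : List String) : Prop := out = filter_scheme_links_py_alt links
instance (links : List String) (out : List String) : Decidable (Spec_filter_scheme_links_py links out) := by unfold Spec_filter_scheme_links_py; infer_instance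

-- ===== CLAIM (what is proved, stated in full; the proofs are below) =====
def Claim_equal_filter_scheme_links_py : Prop := ∀ (links : List String), Dom_filter_scheme_links_py links → Spec_filter_scheme_links_py links (filter_scheme_links_py links)

-- ===== LEMMAS AND PROOFS =====

lemma pvKeywords_ne_nil : ∀ k ∈ pvSchemeKeywords, k.toList ≠ [] := by decide

-- a nonempty pattern is an infix iff it is a prefix at some position strictly inside the list
lemma pv_infix_iff_exists_lt (k s : List Char) (hk : k ≠ []) :
    k <:+: s ↔ ∃ j : ℕ, j < s.length ∧ k <+: s.drop j := by
  constructor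
  · intro h
    obtain ⟨j, hj⟩ := (PySem.Chars.exists_prefix_drop_iff_isIn k s).mpr
      ((PySem.Chars.isIn_iff_infix k s).mpr h)
    refine ⟨j, ?_, hj⟩
    by_contra hge
    push Not at hge
    rw [List.drop_eq_nil_of_le hge] at hj
    exact hk (List.prefix_nil.mp hj)
  · rintro ⟨j, _, hp⟩
    obtain ⟨t, ht⟩ := hp
    exact ⟨s.take j, t, by rw [List.append_assoc, ht, List.take_append_drop]⟩

-- the two per-link conditions compute the same Bool
lemma pv_cond_eq (link : String) :
    pvSchemeKeywords.any (fun keyword => PySem.Str.isIn keyword (PySem.Str.lower link)) =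
    (PySem.List.pyRange 0 (PySem.Str.len (PySem.Str.lower link)) 1).any (fun i =>
       pvSchemeKeywords.any (fun k =>
         PySem.Chars.startswith ((PySem.Str.lower link).toList.drop i.toNat) k.toList)) := by
  rw [Bool.eq_iff_iff]
  simp only [List.any_eq_true, PySem.Str.isIn_iff_infix, PySem.Chars.startswith_iff,
    PySem.List.mem_pyRange_one, PySem.Str.len_eq]
  constructor
  · rintro ⟨k, hkmem, hinf⟩
    obtain ⟨j, hj, hp⟩ :=
      (pv_infix_iff_exists_lt k.toList _ (pvKeywords_ne_nil k hkmem)).mp hinf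
    exact ⟨(j : Int), ⟨by omega, by exact_mod_cast hj⟩, k, hkmem, by simpa using hp⟩
  · rintro ⟨i, ⟨h0, hlt⟩, k, hkmem, hp⟩
    refine ⟨k, hkmem, (pv_infix_iff_exists_lt k.toList _ (pvKeywords_ne_nil k hkmem)).mpr
      ⟨i.toNat, ?_, hp⟩⟩
    omega

-- the two foldl loops agree step by step (by pv_cond_eq), for any accumulator
lemma pv_foldl_eq (links : List String) (acc : List String) :
    List.foldl (fun filtered link =>
      if pvSchemeKeywords.any (fun keyword => PySem.Str.isIn keyword (PySem.Str.lower link))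
      then filtered ++ [link] else filtered) acc links =
    List.foldl (fun out link =>
      if (PySem.List.pyRange 0 (PySem.Str.len (PySem.Str.lower link)) 1).any (fun i =>
           pvSchemeKeywords.any (fun k =>
             PySem.Chars.startswith ((PySem.Str.lower link).toList.drop i.toNat) k.toList))
      then out ++ [link] else out) acc links := by
  induction links generalizing acc with
  | nil => simp
  | cons hd tl ih =>
    simp only [List.foldl_cons]
    rw [pv_cond_eq hd]
    exact ih _

-- ===== VERDICT (by name: the statement is the Claim_ definition above) =====
theorem filter_scheme_links_py_spec : Claim_equal_filter_scheme_links_py :=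
  fun links _ => pv_foldl_eq links []
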